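-- pv_equiv track=rewrite | github.com/BackofenLab/vaRRI | fornac_with_playwright/modifications.py | listIntermolPairs
-- ===== SOURCE A (Python) =====
-- def listIntermolPairs(struc):
--     '''
--     takes a structure and returns a list of indicies
--     where intermolecular basepairs are, given no pseudoknots
--
--     in the first sequence:
--     if a bracket doesnt close it is a intermol bracket
--     we just return the list of not closed brackets at the end
--
--     in the second sequence:
--     if a brackets closes, but there are no opened brackets,
--     it is a intermol bracket
--     we add those to the inter basepair list
--
--
--     eg (())...((...(())&(())...))...(())
--     eg ((..(..))&((..)..))
--        ^                 ^
--     '''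
--     inter_basepairs = []
--     basepairs = []
--     for index, char in enumerate(struc):
--         if char == "(":
--             basepairs += [index]
--         if char == ")":
--             if basepairs:
--                 basepairs.pop()
--             else:
--                 inter_basepairs += [index]
--
-- 	# TODO think about possibillity of intermol basepairs in both? idk if makes sense
--     return inter_basepairs if not basepairs else basepairs
-- ===== SOURCE B (Python) =====
-- def listIntermolPairs(struc):
--     # Two counter passes instead of an index stack.
--     balance = 0
--     closes = []
--     for index, char in enumerate(struc):
--         if char == "(":
--             balance += 1
--         elif char == ")":
--             if balance > 0:
--                 balance -= 1
--             else:
--                 closes.append(index)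
--     balance = 0
--     opens = []
--     for index, char in reversed(list(enumerate(struc))):
--         if char == ")":
--             balance += 1
--         elif char == "(":
--             if balance > 0:
--                 balance -= 1
--             else:
--                 opens.append(index)
--     opens.reverse()
--     return opens if opens else closes
-- ===== Notes on version B (the rewrite author's own statement) =====
-- stated objective: alternative
-- what changed: Replaces the single index-stack pass with two stackless integer-counter passes: a left-to-right pass collecting unmatched close indices and a right-to-left pass collecting unmatched open indices, then the same opens-if-any-else-closes selection.
import Mathlib
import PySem

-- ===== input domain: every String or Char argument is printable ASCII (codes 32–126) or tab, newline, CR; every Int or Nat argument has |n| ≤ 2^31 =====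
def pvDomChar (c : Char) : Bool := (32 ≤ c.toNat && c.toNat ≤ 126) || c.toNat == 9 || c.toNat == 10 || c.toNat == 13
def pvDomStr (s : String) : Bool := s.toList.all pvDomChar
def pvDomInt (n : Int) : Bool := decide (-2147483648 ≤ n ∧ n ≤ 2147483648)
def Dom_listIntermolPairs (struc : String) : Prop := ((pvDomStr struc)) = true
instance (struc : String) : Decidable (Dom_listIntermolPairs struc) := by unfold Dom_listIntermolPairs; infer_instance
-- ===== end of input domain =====

-- B replaces A's index-stack pass by two stackless counter passes (same O(n) cost, different decomposition).

-- ===== PORT A =====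
-- A: one pass; '(' pushes its index on the stack, ')' pops (pop() = remove last) if possible,
-- otherwise records an intermolecular close index.  State = (inter_basepairs, basepairs).
def pvAStep (st : List Int × List Int) (p : Int × Char) : List Int × List Int :=
  let st1 := if p.2 = '(' then (st.1, st.2 ++ [p.1]) else st
  if p.2 = ')' then
    (if st1.2 ≠ [] then (st1.1, st1.2.dropLast) else (st1.1 ++ [p.1], st1.2))
  else st1

def listIntermolPairs (struc : String) : List Int :=
  let r := (PySem.List.enumerate struc.toList 0).foldl pvAStep ([], [])
  if r.2 = [] then r.1 else r.2

-- ===== PORT B =====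
-- left-to-right pass: balance counter + unmatched close indices
def pvBStepL (st : Int × List Int) (p : Int × Char) : Int × List Int :=
  if p.2 = '(' then (st.1 + 1, st.2)
  else if p.2 = ')' then
    (if st.1 > 0 then (st.1 - 1, st.2) else (st.1, st.2 ++ [p.1]))
  else st

-- right-to-left pass: balance counter + unmatched open indices (collected descending)
def pvBStepR (st : Int × List Int) (p : Int × Char) : Int × List Int :=
  if p.2 = ')' then (st.1 + 1, st.2)
  else if p.2 = '(' then
    (if st.1 > 0 then (st.1 - 1, st.2) else (st.1, st.2 ++ [p.1]))
  else st

def listIntermolPairs_alt (struc : String) : List Int :=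
  let closes := ((PySem.List.enumerate struc.toList 0).foldl pvBStepL (0, [])).2
  let opens0 := ((PySem.List.enumerate struc.toList 0).reverse.foldl pvBStepR (0, [])).2
  let opens := opens0.reverse
  if opens ≠ [] then opens else closes

-- ===== PRECONDITION & SPEC =====
def Spec_listIntermolPairs (struc : String) (out : List Int) : Prop := out = listIntermolPairs_alt struc
instance (struc : String) (out : List Int) : Decidable (Spec_listIntermolPairs struc out) := by unfold Spec_listIntermolPairs; infer_instance

-- ===== CLAIM (what is proved, stated in full; the proofs are below) =====
def Claim_equal_listIntermolPairs : Prop := ∀ (struc : String), Dom_listIntermolPairs struc → Spec_listIntermolPairs struc (listIntermolPairs struc)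

-- ===== LEMMAS AND PROOFS =====

-- the stack component of A's fold, in isolation
def pvStkStep (b : List Int) (p : Int × Char) : List Int :=
  if p.2 = '(' then b ++ [p.1] else if p.2 = ')' then b.dropLast else b

theorem pvAStep_snd (st : List Int × List Int) (p : Int × Char) :
    (pvAStep st p).2 = pvStkStep st.2 p := by
  rcases st with ⟨i, b⟩
  unfold pvAStep pvStkStep
  by_cases h1 : p.2 = '(' 
  · simp [h1]
  · by_cases h2 : p.2 = ')'
    · by_cases hb : b = [] <;> simp [h1, h2, hb]
    · simp [h1, h2]

theorem pvA_snd (l : List (Int × Char)) (st : List Int × List Int) :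
    (l.foldl pvAStep st).2 = l.foldl pvStkStep st.2 := by
  induction l generalizing st with
  | nil => rfl
  | cons p l ih => rw [List.foldl_cons, List.foldl_cons, ih, pvAStep_snd]

theorem pvBStepL_sim (st : List Int × List Int) (p : Int × Char) :
    pvBStepL ((st.2.length : Int), st.1) p = (((pvAStep st p).2.length : Int), (pvAStep st p).1) := by
  rcases st with ⟨i, b⟩
  unfold pvAStep pvBStepL
  by_cases h1 : p.2 = '('
  · simp [h1]
  · by_cases h2 : p.2 = ')'
    · by_cases hb : b = []
      · simp [h1, h2, hb]
      · have hpos : 0 < b.length := List.length_pos_iff.mpr hb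
        have hgt : (0 : Int) < (b.length : Int) := by exact_mod_cast hpos
        simp [h2, hb, hpos, List.length_dropLast]
    · simp [h1, h2]

theorem pvBL_sim (l : List (Int × Char)) (st : List Int × List Int) :
    l.foldl pvBStepL ((st.2.length : Int), st.1)
      = (((l.foldl pvAStep st).2.length : Int), (l.foldl pvAStep st).1) := by
  induction l generalizing st with
  | nil => rfl
  | cons p l ih => rw [List.foldl_cons, List.foldl_cons, pvBStepL_sim, ih (pvAStep st p)]

-- the right-to-left counter pass recovers (in reverse) what is left of A's stack
theorem pvBR_sim (l : List (Int × Char)) (k : Nat) (acc : List Int) :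
    (l.reverse.foldl pvBStepR ((k : Int), acc)).2
      = acc ++ ((l.foldl pvStkStep []).take ((l.foldl pvStkStep []).length - k)).reverse := by
  induction l using List.reverseRecOn generalizing k acc with
  | nil => simp
  | append_singleton cs e ih =>
    rw [List.reverse_append, List.reverse_singleton, List.singleton_append, List.foldl_cons,
        List.foldl_append, List.foldl_cons, List.foldl_nil]
    set S := cs.foldl pvStkStep [] with hS
    by_cases h1 : e.2 = ')'
    · have hstep : pvBStepR ((k : Int), acc) e = (((k + 1 : Nat) : Int), acc) := by
        unfold pvBStepR; simp [h1]
      have hstk : pvStkStep S e = S.dropLast := by unfold pvStkStep; simp [h1]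
      rw [hstep, ih, hstk]
      rw [show S.dropLast.length - k = S.length - (k + 1) from by
        rw [List.length_dropLast]; omega]
      rw [List.dropLast_eq_take, List.take_take, Nat.min_eq_left (by omega)]
    · by_cases h2 : e.2 = '('
      · have hstk : pvStkStep S e = S ++ [e.1] := by unfold pvStkStep; simp [h1, h2]
        rw [hstk]
        by_cases hk : k = 0
        · have hstep : pvBStepR ((k : Int), acc) e = ((0 : Int), acc ++ [e.1]) := by
            unfold pvBStepR; simp [h1, h2, hk]
          rw [hstep]
          have h0 := ih 0 (acc ++ [e.1])
          simp only [Nat.cast_zero, Nat.sub_zero, List.take_length] at h0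
          rw [h0]
          simp only [hk, Nat.sub_zero]
          rw [List.take_of_length_le (by simp)]
          simp
        · have hstep : pvBStepR ((k : Int), acc) e = (((k - 1 : Nat) : Int), acc) := by
            unfold pvBStepR
            have hkpos : (0 : Int) < (k : Int) := by exact_mod_cast Nat.pos_of_ne_zero hk
            simp [h1, h2, hkpos, Nat.pos_of_ne_zero hk]
          rw [hstep, ih]
          have hle : (S ++ [e.1]).length - k ≤ S.length := by
            rw [List.length_append]; simp; omega
          rw [List.take_append_of_le_length hle]
          congr 3
          rw [List.length_append]
          simp
          omega
      · have hstep : pvBStepR ((k : Int), acc) e = ((k : Int), acc) := by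
          unfold pvBStepR; simp [h1, h2]
        have hstk : pvStkStep S e = S := by unfold pvStkStep; simp [h1, h2]
        rw [hstep, hstk, ih]

-- ===== VERDICT (by name: the statement is the Claim_ definition above) =====
theorem listIntermolPairs_spec : Claim_equal_listIntermolPairs := by
  intro struc _
  unfold Spec_listIntermolPairs listIntermolPairs listIntermolPairs_alt
  set l := PySem.List.enumerate struc.toList 0 with hl
  set S := l.foldl pvStkStep [] with hS
  have hbp : (l.foldl pvAStep ([], [])).2 = S := pvA_snd l ([], [])
  have hcl : (l.foldl pvBStepL (0, [])).2 = (l.foldl pvAStep ([], [])).1 := by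
    have := pvBL_sim l ([], [])
    simp only [List.length_nil, Nat.cast_zero] at this
    rw [this]
  have hop : (l.reverse.foldl pvBStepR (0, [])).2 = S.reverse := by
    have := pvBR_sim l 0 []
    simp only [Nat.cast_zero, Nat.sub_zero, List.take_length, List.nil_append] at this
    exact this
  simp only [hcl, hop, List.reverse_reverse]
  by_cases h : S = [] <;> simp [h, hbp]
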